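-- pv_equiv track=rewrite | github.com/airwallex/splunk-pipeline-oss | pipeline/fleetdm.py | from_id
-- ===== SOURCE A (Python) =====
-- def from_id(result, id):
--     recent_result = []
--     curr_id = result[0]['id']
--
--     for result in result:
--         if result['id'] > id:
--             recent_result.append(result)
--         elif result['id'] == id:
--             break
--
--         curr_id -= 1
--
--     return (curr_id, recent_result)
-- ===== SOURCE B (Python) =====
-- def from_id(result, id):
--     first = result[0]['id']
--     # phase 1: push every record onto a stack until the sentinel id is seen
--     pending = []
--     for r in result:
--         if r['id'] == id:
--             break
--         pending.append(r)
--     count = len(pending)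
--     # phase 2: unwind the stack, building the kept records back-to-front
--     recent = []
--     while pending:
--         r = pending.pop()
--         if r['id'] > id:
--             recent.append(r)
--     recent.reverse()
--     return (first - count, recent)
-- ===== Notes on version B (the rewrite author's own statement) =====
-- stated objective: alternative
-- what changed: Replaces A's fused loop (running decrement + append + break) by two staged phases: push the pre-sentinel prefix onto an explicit stack, then unwind the stack popping back-to-front to build the kept records, finishing with a reverse; curr_id becomes first id minus stack size.
import Mathlib
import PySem

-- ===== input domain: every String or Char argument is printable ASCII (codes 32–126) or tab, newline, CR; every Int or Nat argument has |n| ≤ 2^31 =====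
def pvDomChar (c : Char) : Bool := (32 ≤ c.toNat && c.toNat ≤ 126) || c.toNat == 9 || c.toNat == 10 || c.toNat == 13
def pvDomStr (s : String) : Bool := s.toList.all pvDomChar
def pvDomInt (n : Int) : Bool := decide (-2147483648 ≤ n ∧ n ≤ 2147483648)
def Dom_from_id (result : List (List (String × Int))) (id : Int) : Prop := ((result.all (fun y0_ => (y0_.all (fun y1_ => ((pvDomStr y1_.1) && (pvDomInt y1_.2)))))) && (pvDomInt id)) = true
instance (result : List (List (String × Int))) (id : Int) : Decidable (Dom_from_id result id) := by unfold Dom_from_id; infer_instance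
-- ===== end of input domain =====

-- B replaces A's fused loop (running decrement + append + break) by two staged passes:
-- push the pre-sentinel prefix onto an explicit stack, then unwind the stack back-to-front
-- and reverse; objective: alternative (same cost, different decomposition).

-- ===== PORT A =====
-- A's for-loop with break, carrying curr_id and recent_result; a missing 'id' key
-- (KeyError in Python) returns the state unchanged — such inputs are outside Pre_.
def fromIdLoop (rs : List (List (String × Int))) (id : Int) (curr : Int)
    (recent : List (List (String × Int))) : Int × (List (List (String × Int))) :=
  match rs with
  | [] => (curr, recent)
  | r :: rest =>
    match (PySem.Dict.mk r).get? "id" with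
    | none => (curr, recent)  -- KeyError, excluded by Pre_
    | some v =>
      if v > id then fromIdLoop rest id (curr - 1) (recent ++ [r])
      else if v = id then (curr, recent)
      else fromIdLoop rest id (curr - 1) recent

def from_id (result : List (List (String × Int))) (id : Int) : Int × (List (List (String × Int))) :=
  match result with
  | [] => (0, [])  -- IndexError on result[0], excluded by Pre_
  | r0 :: _ =>
    match (PySem.Dict.mk r0).get? "id" with
    | none => (0, [])  -- KeyError, excluded by Pre_
    | some c => fromIdLoop result id c []

-- ===== PORT B =====
-- phase 1: push records onto the stack until r['id'] == id (a record without the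
-- key raises KeyError in Python — outside Pre_; here it is pushed and the scan goes on)
def pushLoop (rs : List (List (String × Int))) (id : Int)
    (pending : List (List (String × Int))) : List (List (String × Int)) :=
  match rs with
  | [] => pending
  | r :: rest =>
    if (PySem.Dict.mk r).get? "id" = some id then pending
    else pushLoop rest id (pending ++ [r])

-- phase 2: 'while pending: r = pending.pop(); …' pops from the END of the stack, i.e.
-- it consumes pending.reverse head-first; this helper is that while-loop on the reversed stack
def unwindLoop (ps : List (List (String × Int))) (id : Int)
    (recent : List (List (String × Int))) : List (List (String × Int)) :=
  match ps with
  | [] => recent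
  | r :: rest =>
    match (PySem.Dict.mk r).get? "id" with
    | some v => if v > id then unwindLoop rest id (recent ++ [r]) else unwindLoop rest id recent
    | none => unwindLoop rest id recent  -- KeyError in Python, outside Pre_

def from_id_alt (result : List (List (String × Int))) (id : Int) : Int × (List (List (String × Int))) :=
  match result with
  | [] => (0, [])  -- IndexError on result[0], excluded by Pre_
  | r0 :: _ =>
    match (PySem.Dict.mk r0).get? "id" with
    | none => (0, [])  -- KeyError, excluded by Pre_
    | some first =>
      let pending := pushLoop result id []
      let count : Int := (pending.length : Int)
      let recent := unwindLoop pending.reverse id []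
      (first - count, recent.reverse)

-- ===== PRECONDITION & SPEC =====
-- A raises IndexError on an empty list and KeyError at the first record lacking key
-- "id" that is scanned before (or instead of) a record whose "id" equals id; Pre_
-- admits exactly the inputs on which A returns.
def Pre_from_id (result : List (List (String × Int))) (id : Int) : Prop :=
  result ≠ [] ∧
  ∀ r ∈ result.takeWhile (fun r => (PySem.Dict.mk r).get? "id" ≠ some id),
    ((PySem.Dict.mk r).get? "id").isSome
instance (result : List (List (String × Int))) (id : Int) : Decidable (Pre_from_id result id) := by unfold Pre_from_id; infer_instance

def pvWitness_from_id : (List (List (String × Int))) × Int :=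
  ([[("id", 5)], [("id", 3)], [("id", 2)], [("x", 9)]], 3)

def Spec_from_id (result : List (List (String × Int))) (id : Int) (out : Int × (List (List (String × Int)))) : Prop := out = from_id_alt result id
instance (result : List (List (String × Int))) (id : Int) (out : Int × (List (List (String × Int)))) : Decidable (Spec_from_id result id out) := by unfold Spec_from_id; infer_instance

-- ===== CLAIM (what is proved, stated in full; the proofs are below) =====
def Claim_equal_from_id : Prop := ∀ (result : List (List (String × Int))) (id : Int), Dom_from_id result id → Pre_from_id result id → Spec_from_id result id (from_id result id)

-- ===== LEMMAS AND PROOFS =====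

-- the filter both programs compute, as a predicate
def keepPred (id : Int) (r : List (String × Int)) : Bool :=
  match (PySem.Dict.mk r).get? "id" with
  | some v => decide (v > id)
  | none => false

theorem pushLoop_eq (id : Int) :
    ∀ (rs acc : List (List (String × Int))),
    pushLoop rs id acc = acc ++ rs.takeWhile (fun r => (PySem.Dict.mk r).get? "id" ≠ some id) := by
  intro rs
  induction rs with
  | nil => intro acc; simp [pushLoop]
  | cons r rest ih =>
    intro acc
    by_cases hid : (PySem.Dict.mk r).get? "id" = some id
    · simp [pushLoop, hid, List.takeWhile]
    · simp [pushLoop, hid, List.takeWhile, ih]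

theorem unwindLoop_eq (id : Int) :
    ∀ (ps acc : List (List (String × Int))),
    unwindLoop ps id acc = acc ++ ps.filter (keepPred id) := by
  intro ps
  induction ps with
  | nil => intro acc; simp [unwindLoop]
  | cons r rest ih =>
    intro acc
    match hv : (PySem.Dict.mk r).get? "id" with
    | none => simp [unwindLoop, hv, ih, keepPred]
    | some v =>
      by_cases hgt : v > id
      · simp [unwindLoop, hv, hgt, ih, keepPred]
      · simp [unwindLoop, hv, hgt, ih, keepPred]

theorem fromIdLoop_eq (id : Int) :
    ∀ (rs : List (List (String × Int))) (curr : Int) (recent : List (List (String × Int))),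
    (∀ r ∈ rs.takeWhile (fun r => (PySem.Dict.mk r).get? "id" ≠ some id),
        ((PySem.Dict.mk r).get? "id").isSome) →
    fromIdLoop rs id curr recent =
      (curr - ((rs.takeWhile (fun r => (PySem.Dict.mk r).get? "id" ≠ some id)).length : Int),
       recent ++ (rs.takeWhile (fun r => (PySem.Dict.mk r).get? "id" ≠ some id)).filter (keepPred id)) := by
  intro rs
  induction rs with
  | nil => intro curr recent _; simp [fromIdLoop]
  | cons r rest ih =>
    intro curr recent h
    by_cases hid : (PySem.Dict.mk r).get? "id" = some id
    · simp [fromIdLoop, hid, List.takeWhile]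
    · have hr : ((PySem.Dict.mk r).get? "id").isSome := by
        apply h; simp [List.takeWhile, hid]
      obtain ⟨v, hv⟩ := Option.isSome_iff_exists.mp hr
      have hrest : ∀ x ∈ rest.takeWhile (fun r => (PySem.Dict.mk r).get? "id" ≠ some id),
          ((PySem.Dict.mk x).get? "id").isSome := by
        intro x hx
        apply h
        simp [List.takeWhile, hid]
        right; simpa using hx
      have hvne : v ≠ id := by rintro rfl; exact hid hv
      have htw : (r :: rest).takeWhile (fun r => (PySem.Dict.mk r).get? "id" ≠ some id)
          = r :: rest.takeWhile (fun r => (PySem.Dict.mk r).get? "id" ≠ some id) := by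
        simp [List.takeWhile, hid]
      rw [htw]
      by_cases hgt : v > id
      · have hl : fromIdLoop (r :: rest) id curr recent
            = fromIdLoop rest id (curr - 1) (recent ++ [r]) := by
          simp [fromIdLoop, hv, hgt]
        rw [hl, ih _ _ hrest, List.filter_cons]
        simp only [keepPred, hv, Prod.mk.injEq]
        rw [if_pos (by simpa using hgt)]
        constructor
        · simp [List.length_cons]; ring
        · simp
      · have hl : fromIdLoop (r :: rest) id curr recent
            = fromIdLoop rest id (curr - 1) recent := by
          simp [fromIdLoop, hv, hgt, hvne]
        rw [hl, ih _ _ hrest, List.filter_cons]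
        simp only [keepPred, hv, Prod.mk.injEq]
        rw [if_neg (by simpa using hgt)]
        constructor
        · simp [List.length_cons]; ring
        · rfl

-- ===== VERDICT (by name: the statement is the Claim_ definition above) =====
theorem from_id_spec : Claim_equal_from_id := by
  intro result id _ hpre
  obtain ⟨hne, hkeys⟩ := hpre
  unfold Spec_from_id
  match result, hne with
  | r0 :: rest, _ =>
    have h0 : ((PySem.Dict.mk r0).get? "id").isSome := by
      by_cases hid : (PySem.Dict.mk r0).get? "id" = some id
      · simp [hid]
      · apply hkeys; simp [List.takeWhile, hid]
    obtain ⟨c, hc⟩ := Option.isSome_iff_exists.mp h0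
    simp only [from_id, from_id_alt, hc]
    rw [fromIdLoop_eq id (r0 :: rest) c [] hkeys]
    rw [pushLoop_eq, unwindLoop_eq]
    simp [List.filter_reverse]
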